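-- pv_equiv track=rewrite | github.com/brofi/coh2-live-stats | src/coh2_live_stats/data/player.py | rank_level_from_rank
-- ===== SOURCE A (Python) =====
-- def rank_level_from_rank(rank: int, rank_total: int) -> int:
--     """Calculate the corresponding level for the given rank."""
--     if rank <= 0 or rank_total <= 0:
--         return -1
--
--     lvl = 0
--     if 0 < rank <= 2:  # noqa: PLR2004
--         lvl = 20
--     elif 2 < rank <= 13:  # noqa: PLR2004
--         lvl = 19
--     elif 13 < rank <= 36:  # noqa: PLR2004
--         lvl = 18
--     elif 36 < rank <= 80:  # noqa: PLR2004
--         lvl = 17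
--     elif 80 < rank <= 200:  # noqa: PLR2004
--         lvl = 16
--     else:  # build and search the rest of the ranking
--         ratio_lvl_1_14 = [6, 8, 6, 5] + 3 * [10] + 2 * [7] + [6] + 4 * [5]
--         n_top_200 = min(200, rank_total)
--         remain = rank_total - n_top_200
--         ranking = []
--         for r in ratio_lvl_1_14:
--             n = min(round(rank_total * (r / 100)), max(0, remain))
--             ranking.append(remain + n_top_200)
--             remain -= n
--         while lvl < len(ranking) and rank <= ranking[lvl]:
--             lvl += 1
--     return lvl
-- ===== SOURCE B (Python) =====
-- def rank_level_from_rank(rank: int, rank_total: int) -> int: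
--     """Calculate the corresponding level for the given rank."""
--     if rank <= 0 or rank_total <= 0:
--         return -1
--     for lvl, bound in ((20, 2), (19, 13), (18, 36), (17, 80), (16, 200)):
--         if rank <= bound:
--             return lvl
--     # Outside the top 200, level i (14 down to 1) holds round(rank_total*r/100)
--     # players (clamped by the pool below the top 200).  Because the clamped
--     # remainders have the closed form max(0, pool - prefix_sum), a rank reaches
--     # level count = |{ i in 0..13 : prefix_sum_i <= rank_total - rank }|:
--     # no remainder state, no clamping, no early exit needed.
--     budget = rank_total - rank
--     covered, lvl = 0, 0
--     for r in (6, 8, 6, 5, 10, 10, 10, 7, 7, 6, 5, 5, 5, 5):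
--         if covered <= budget:
--             lvl += 1
--         covered += round(rank_total * (r / 100))
--     return lvl
-- ===== Notes on version B (the rewrite author's own statement) =====
-- stated objective: alternative
-- what changed: B replaces A's simulation (build the clamped-remainder ranking list, then while-scan it) by a direct counting formula: since the clamped remainders equal max(0, pool - prefix_sum), the level is the number of tier prefix sums not exceeding rank_total - rank, computed with no remainder state, no clamping and no list; the top-200 ladder becomes a table scan.
import Mathlib
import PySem

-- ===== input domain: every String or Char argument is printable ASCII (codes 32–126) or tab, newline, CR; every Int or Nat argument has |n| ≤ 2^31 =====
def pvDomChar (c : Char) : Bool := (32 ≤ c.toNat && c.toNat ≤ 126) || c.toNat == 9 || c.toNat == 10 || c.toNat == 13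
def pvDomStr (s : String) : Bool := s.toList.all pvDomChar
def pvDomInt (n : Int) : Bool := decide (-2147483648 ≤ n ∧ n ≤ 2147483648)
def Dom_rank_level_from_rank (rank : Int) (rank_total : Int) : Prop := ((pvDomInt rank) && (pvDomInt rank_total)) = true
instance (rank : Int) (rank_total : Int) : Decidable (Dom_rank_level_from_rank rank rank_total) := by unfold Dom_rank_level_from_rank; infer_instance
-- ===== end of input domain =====

-- B replaces A's simulation (build the clamped-remainder ranking, while-scan it)
-- by a counting formula over tier prefix sums; same values, same O(1) cost.

-- ===== shared float helpers =====
-- Both Pythons compute the identical expression round(rank_total * (r / 100)) on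
-- IEEE doubles; it is ported by hand, exactly, via integer arithmetic:
-- round-half-even, round-to-nearest double of a positive rational, two chained
-- roundings.  Exact on 1 ≤ rank_total ≤ 2^31 (inputs are exact in double).

-- round-half-even of num/den (num ≥ 0, den > 0)
def pvRhe (num den : Nat) : Nat :=
  let q := num / den
  let rem := num % den
  if 2 * rem < den then q
  else if den < 2 * rem then q + 1
  else if q % 2 = 0 then q else q + 1

-- num ≥ den * 2^d, for a possibly negative d
def pvGeScaled (num den : Nat) (d : Int) : Bool :=
  if 0 ≤ d then den * 2 ^ d.toNat ≤ num else den ≤ num * 2 ^ (-d).toNat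

-- nearest IEEE double (m, e), value m * 2^e with 2^52 ≤ m ≤ 2^53, of num/den (num, den ≥ 1)
def pvNearestD (num den : Nat) : Nat × Int :=
  let d : Int := (num.log2 + 1 : Nat) - (den.log2 + 1 : Nat)
  let e : Int := if pvGeScaled num den d then d - 52 else d - 53
  let m := if e ≤ 0 then pvRhe (num * 2 ^ (-e).toNat) den else pvRhe num (den * 2 ^ e.toNat)
  (m, e)

-- exact model of Python's round(n * (r / 100)) for n, r ≥ 1 (0 otherwise; unreached)
def pyRoundMul (n r : Int) : Int :=
  if n ≤ 0 ∨ r ≤ 0 then 0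
  else
    let (m1, e1) := pvNearestD r.toNat 100
    let (num2, den2) := if 0 ≤ e1 then (n.toNat * m1 * 2 ^ e1.toNat, 1) else (n.toNat * m1, 2 ^ (-e1).toNat)
    let (m2, e2) := pvNearestD num2 den2
    if 0 ≤ e2 then ((m2 * 2 ^ e2.toNat : Nat) : Int) else ((pvRhe m2 (2 ^ (-e2).toNat) : Nat) : Int)

-- ===== PORT A =====
-- the for-loop building `ranking` (state: remain; appends remain + n_top_200)
def pvBuildA (total n_top : Int) : List Int → Int → List Int
  | [], _ => []
  | r :: rs, remain =>
      let n := min (pyRoundMul total r) (max 0 remain)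
      (remain + n_top) :: pvBuildA total n_top rs (remain - n)

-- the while-loop: advance lvl while rank ≤ ranking[lvl]
def pvWhileA (rank : Int) : List Int → Int
  | [] => 0
  | t :: ts => if rank ≤ t then 1 + pvWhileA rank ts else 0

def rank_level_from_rank (rank : Int) (rank_total : Int) : Int :=
  if rank ≤ 0 ∨ rank_total ≤ 0 then -1
  else if 0 < rank ∧ rank ≤ 2 then 20
  else if 2 < rank ∧ rank ≤ 13 then 19
  else if 13 < rank ∧ rank ≤ 36 then 18
  else if 36 < rank ∧ rank ≤ 80 then 17
  else if 80 < rank ∧ rank ≤ 200 then 16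
  else
    let ratio_lvl_1_14 : List Int := [6, 8, 6, 5] ++ [10, 10, 10] ++ [7, 7] ++ [6] ++ [5, 5, 5, 5]
    let n_top_200 := min 200 rank_total
    let remain := rank_total - n_top_200
    let ranking := pvBuildA rank_total n_top_200 ratio_lvl_1_14 remain
    pvWhileA rank ranking

-- ===== PORT B =====
-- the early-return for-loop over the tier table
def pvTierScanB (rank : Int) : List (Int × Int) → Option Int
  | [] => none
  | (lvl, bound) :: ts => if rank ≤ bound then some lvl else pvTierScanB rank ts

-- B's counting pass (state: covered, lvl); no clamping, no early exit
def pvCountB (budget total : Int) : List Int → Int → Int → Int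
  | [], _, lvl => lvl
  | r :: rs, covered, lvl =>
      pvCountB budget total rs (covered + pyRoundMul total r)
        (if covered ≤ budget then lvl + 1 else lvl)

def rank_level_from_rank_alt (rank : Int) (rank_total : Int) : Int :=
  if rank ≤ 0 ∨ rank_total ≤ 0 then -1
  else
    match pvTierScanB rank [(20, 2), (19, 13), (18, 36), (17, 80), (16, 200)] with
    | some lvl => lvl
    | none =>
        pvCountB (rank_total - rank) rank_total
          [6, 8, 6, 5, 10, 10, 10, 7, 7, 6, 5, 5, 5, 5] 0 0

-- ===== PRECONDITION & SPEC =====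
def Spec_rank_level_from_rank (rank : Int) (rank_total : Int) (out : Int) : Prop := out = rank_level_from_rank_alt rank rank_total
instance (rank : Int) (rank_total : Int) (out : Int) : Decidable (Spec_rank_level_from_rank rank rank_total out) := by unfold Spec_rank_level_from_rank; infer_instance

-- ===== CLAIM =====
def Claim_equal_rank_level_from_rank : Prop := ∀ (rank : Int) (rank_total : Int), Dom_rank_level_from_rank rank rank_total → Spec_rank_level_from_rank rank rank_total (rank_level_from_rank rank rank_total)

-- ===== LEMMAS AND PROOFS =====
theorem pyRoundMul_nonneg (n r : Int) : 0 ≤ pyRoundMul n r := by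
  unfold pyRoundMul
  split_ifs
  · exact le_refl 0
  · dsimp only
    split_ifs <;> exact Int.natCast_nonneg _

-- once covered exceeds the budget it stays there: the tail adds nothing
theorem pvCountB_stuck (budget total : Int) :
    ∀ (rs : List Int) (covered lvl : Int), budget < covered →
      pvCountB budget total rs covered lvl = lvl := by
  intro rs
  induction rs with
  | nil => intro covered lvl _; simp [pvCountB]
  | cons r rs ih =>
      intro covered lvl h
      have hr := pyRoundMul_nonneg total r
      simp only [pvCountB, if_neg (by omega : ¬ covered ≤ budget)]
      exact ih _ _ (by omega)

-- B's counting pass computes A's build-then-scan: the clamped remainder is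
-- max 0 (total - n_top - covered), and rank > 200 ≥ n_top kills the clamp
theorem pvCount_eq (rank total n_top : Int) (h200 : 200 < rank) (hn : n_top ≤ 200) :
    ∀ (rs : List Int) (covered lvl : Int),
      pvCountB (total - rank) total rs covered lvl
        = lvl + pvWhileA rank (pvBuildA total n_top rs (max 0 (total - n_top - covered))) := by
  intro rs
  induction rs with
  | nil => intro covered lvl; simp [pvCountB, pvBuildA, pvWhileA]
  | cons r rs ih =>
      intro covered lvl
      have hr := pyRoundMul_nonneg total r
      simp only [pvCountB, pvBuildA, pvWhileA]
      by_cases hc : covered ≤ total - rank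
      · rw [if_pos hc, if_pos (by omega : rank ≤ max 0 (total - n_top - covered) + n_top), ih]
        have : max 0 (total - n_top - covered) - min (pyRoundMul total r) (max 0 (max 0 (total - n_top - covered)))
            = max 0 (total - n_top - (covered + pyRoundMul total r)) := by omega
        rw [this]; ring
      · rw [if_neg hc, if_neg (by omega : ¬ rank ≤ max 0 (total - n_top - covered) + n_top)]
        rw [pvCountB_stuck _ _ _ _ _ (by omega)]
        omega

-- ===== VERDICT =====
theorem rank_level_from_rank_spec : Claim_equal_rank_level_from_rank := by
  intro rank rank_total _
  unfold Spec_rank_level_from_rank rank_level_from_rank rank_level_from_rank_alt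
  by_cases hg : rank ≤ 0 ∨ rank_total ≤ 0
  · simp [hg]
  · simp only [if_neg hg, pvTierScanB]
    simp only [not_or, not_le] at hg
    by_cases h1 : rank ≤ 2
    · rw [if_pos ⟨hg.1, h1⟩, if_pos h1]
    rw [if_neg (by omega : ¬ (0 < rank ∧ rank ≤ 2)), if_neg h1]
    by_cases h2 : rank ≤ 13
    · rw [if_pos ⟨by omega, h2⟩, if_pos h2]
    rw [if_neg (by omega : ¬ (2 < rank ∧ rank ≤ 13)), if_neg h2]
    by_cases h3 : rank ≤ 36
    · rw [if_pos ⟨by omega, h3⟩, if_pos h3]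
    rw [if_neg (by omega : ¬ (13 < rank ∧ rank ≤ 36)), if_neg h3]
    by_cases h4 : rank ≤ 80
    · rw [if_pos ⟨by omega, h4⟩, if_pos h4]
    rw [if_neg (by omega : ¬ (36 < rank ∧ rank ≤ 80)), if_neg h4]
    by_cases h5 : rank ≤ 200
    · rw [if_pos ⟨by omega, h5⟩, if_pos h5]
    rw [if_neg (by omega : ¬ (80 < rank ∧ rank ≤ 200)), if_neg h5]
    simp only
    rw [pvCount_eq rank rank_total (min 200 rank_total) (by omega) (by omega)]
    have : max 0 (rank_total - min 200 rank_total - 0) = rank_total - min 200 rank_total := by omega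
    rw [this]
    norm_num
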